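-- pv_equiv track=rewrite | github.com/animals-now/AnalyticsBots | data_getter.py | __create_date_ranges
-- ===== SOURCE A (Python) =====
-- def __create_date_ranges(start, end, num_periods):
--     """
--     Create date range list as require in analytics api.
--     :param start: days ago for the start of the period(int).
--     :param end: days ago for the end of the period(int).
--     :param num_periods: num of periods.
--     :return: list of dictionary
--     """
--     # [{'startDate': '30daysAgo', 'endDate': 'today'},
--     #  {'startDate': '60daysAgo', 'endDate': '30daysAgo'}],
--     date_range_list = []
--     delta = start - end
--     for period in range(num_periods):
--         period_dict = dict()
--         period_dict['startDate'] = '{}daysAgo'.format(start)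
--         period_dict['endDate'] = '{}daysAgo'.format(end)
--         date_range_list.append(period_dict)
--         start += delta
--         end += delta
--
--     return date_range_list
-- ===== SOURCE B (Python) =====
-- def __create_date_ranges(start, end, num_periods):
--     """Two staged passes: first build the list of period-boundary labels
--     (end + i*delta days-ago for i = 0..num_periods), then pair adjacent
--     boundaries: period i runs from boundary i+1 back to boundary i."""
--     delta = start - end
--     labels = ['{}daysAgo'.format(end + i * delta) for i in range(num_periods + 1)]
--     return [{'startDate': s, 'endDate': e} for s, e in zip(labels[1:], labels)]
-- ===== Notes on version B (the rewrite author's own statement) =====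
-- stated objective: alternative
-- what changed: B uses a staged boundary-label decomposition: it first formats the num_periods+1 period-boundary labels (end + i*delta days-ago), then zips adjacent labels into the startDate/endDate dicts, instead of A's single loop that mutates start/end accumulators and formats both ends of each period independently.
import Mathlib
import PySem

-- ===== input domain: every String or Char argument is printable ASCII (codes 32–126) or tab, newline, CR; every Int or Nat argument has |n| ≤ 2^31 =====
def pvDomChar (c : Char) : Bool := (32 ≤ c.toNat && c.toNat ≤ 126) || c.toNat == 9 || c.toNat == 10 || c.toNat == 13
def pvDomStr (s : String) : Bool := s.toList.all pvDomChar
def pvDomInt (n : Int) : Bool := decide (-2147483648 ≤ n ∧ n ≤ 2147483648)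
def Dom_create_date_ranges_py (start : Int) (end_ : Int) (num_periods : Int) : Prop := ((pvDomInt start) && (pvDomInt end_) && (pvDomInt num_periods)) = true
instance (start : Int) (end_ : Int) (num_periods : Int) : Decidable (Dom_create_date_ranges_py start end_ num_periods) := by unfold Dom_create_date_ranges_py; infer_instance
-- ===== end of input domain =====

-- B builds the num_periods+1 boundary labels once and zips adjacent ones, instead of
-- A's loop mutating start/end accumulators (alternative decomposition, same cost).

-- ===== PORT A =====
-- A: loop over range(num_periods), building each dict by two insertions and shifting start/end by delta.
def create_date_ranges_py (start : Int) (end_ : Int) (num_periods : Int) : List (List (String × String)) :=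
  let delta := start - end_
  let res := (PySem.List.pyRange 0 num_periods 1).foldl
    (fun (st : List (List (String × String)) × Int × Int) _ =>
      let (date_range_list, s, e) := st
      let period_dict : PySem.Dict String String := PySem.Dict.empty
      let period_dict := period_dict.insert "startDate" (PySem.Int.toStr s ++ "daysAgo")
      let period_dict := period_dict.insert "endDate" (PySem.Int.toStr e ++ "daysAgo")
      (date_range_list ++ [period_dict.items], s + delta, e + delta))
    ([], start, end_)
  res.1

-- ===== PORT B =====
-- B: build the boundary labels (end_ + i*delta for i in range(num_periods+1)),
-- then zip labels[1:] with labels into the dicts.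
def create_date_ranges_py_alt (start : Int) (end_ : Int) (num_periods : Int) : List (List (String × String)) :=
  let delta := start - end_
  let labels := (PySem.List.pyRange 0 (num_periods + 1) 1).map
    (fun i => PySem.Int.toStr (end_ + i * delta) ++ "daysAgo")
  (List.zip (PySem.List.slice labels (some 1) none) labels).map
    (fun p => [("startDate", p.1), ("endDate", p.2)])

-- ===== PRECONDITION & SPEC =====
def Spec_create_date_ranges_py (start : Int) (end_ : Int) (num_periods : Int) (out : List (List (String × String))) : Prop := out = create_date_ranges_py_alt start end_ num_periods
instance (start : Int) (end_ : Int) (num_periods : Int) (out : List (List (String × String))) : Decidable (Spec_create_date_ranges_py start end_ num_periods out) := by unfold Spec_create_date_ranges_py; infer_instance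

-- ===== CLAIM (what is proved, stated in full; the proofs are below) =====
def Claim_equal_create_date_ranges_py : Prop := ∀ (start : Int) (end_ : Int) (num_periods : Int), Dom_create_date_ranges_py start end_ num_periods → Spec_create_date_ranges_py start end_ num_periods (create_date_ranges_py start end_ num_periods)

-- ===== LEMMAS AND PROOFS =====

def pvEntry (s e : Int) : List (String × String) :=
  [("startDate", PySem.Int.toStr s ++ "daysAgo"), ("endDate", PySem.Int.toStr e ++ "daysAgo")]

theorem pv_foldA (d : Int) (n : Nat) :
    ∀ (s e : Int) (acc : List (List (String × String))),
    (PySem.List.pyRange 0 (n : Int) 1).foldl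
      (fun (st : List (List (String × String)) × Int × Int) _ =>
        let (l, s, e) := st
        let pd : PySem.Dict String String := PySem.Dict.empty
        let pd := pd.insert "startDate" (PySem.Int.toStr s ++ "daysAgo")
        let pd := pd.insert "endDate" (PySem.Int.toStr e ++ "daysAgo")
        (l ++ [pd.items], s + d, e + d))
      (acc, s, e)
    = (acc ++ (List.range n).map (fun (k : Nat) => pvEntry (s + (k : Int) * d) (e + (k : Int) * d)),
       s + n * d, e + n * d) := by
  induction n with
  | zero =>
    intro s e acc
    simp [pvEntry]
  | succ m ih =>
    intro s e acc
    have h : PySem.List.pyRange 0 ((m : Int) + 1) 1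
        = (0 : Int) :: PySem.List.pyRange 1 ((m : Int) + 1) 1 := by
      apply PySem.List.pyRange_one_cons; omega
    have h2 : PySem.List.pyRange 1 ((m : Int) + 1) 1
        = (PySem.List.pyRange 0 (m : Int) 1).map (fun x => x + 1) := by
      simp [PySem.List.pyRange_one]
      intro a _
      ring
    push_cast
    rw [h, List.foldl_cons, h2, List.foldl_map]
    rw [ih (s + d) (e + d)
      (acc ++ [(((PySem.Dict.empty.insert "startDate" (PySem.Int.toStr s ++ "daysAgo")).insert
        "endDate" (PySem.Int.toStr e ++ "daysAgo")).items : List (String × String))])]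
    have hd : (((PySem.Dict.empty.insert "startDate" (PySem.Int.toStr s ++ "daysAgo")).insert
        "endDate" (PySem.Int.toStr e ++ "daysAgo")).items : List (String × String))
        = pvEntry s e := by
      simp [PySem.Dict.empty, PySem.Dict.insert, pvEntry]
    rw [hd]
    rw [Prod.ext_iff, Prod.ext_iff]
    refine ⟨?_, by push_cast; ring, by push_cast; ring⟩
    rw [List.range_succ_eq_map, List.map_cons, List.map_map]
    have hmap : ((fun k : Nat => pvEntry (s + (k : Int) * d) (e + (k : Int) * d)) ∘ Nat.succ)
        = (fun k : Nat => pvEntry (s + d + (k : Int) * d) (e + d + (k : Int) * d)) := by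
      funext k
      simp only [Function.comp_apply, pvEntry]
      push_cast
      ring_nf
    rw [hmap]
    simp [pvEntry]

-- zip of a length-n map with a length-(n+1) map over ranges truncates to n pairs
theorem pv_zip_range_maps {α β : Type} (f : Nat → α) (g : Nat → β) (n : Nat) :
    List.zip ((List.range n).map f) ((List.range (n + 1)).map g)
      = (List.range n).map (fun k => (f k, g k)) := by
  rw [List.range_succ, List.map_append]
  have h : (List.range n).map f = (List.range n).map f ++ [] := by simp
  rw [h, List.zip_append (by simp)]
  simp [List.zip_map']

-- B in canonical form: n entries, entry k from boundaries k+1 and k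
theorem pv_altB (start end_ : Int) (n : Nat) :
    create_date_ranges_py_alt start end_ (n : Int)
      = (List.range n).map
          (fun (k : Nat) => pvEntry (start + (k : Int) * (start - end_)) (end_ + (k : Int) * (start - end_))) := by
  simp only [create_date_ranges_py_alt]
  have hr : PySem.List.pyRange 0 ((n : Int) + 1) 1
      = (List.range (n + 1)).map (fun k : Nat => (k : Int)) := by
    rw [PySem.List.pyRange_one]
    simp
  rw [hr, List.map_map, PySem.List.slice_from_one]
  have ht : ((List.range (n + 1)).map
      ((fun i => PySem.Int.toStr (end_ + i * (start - end_)) ++ "daysAgo") ∘ fun k : Nat => (k : Int))).tail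
      = (List.range n).map
        (fun k : Nat => PySem.Int.toStr (end_ + ((k : Int) + 1) * (start - end_)) ++ "daysAgo") := by
    rw [List.range_succ_eq_map, List.map_cons, List.tail_cons, List.map_map]
    apply List.map_congr_left
    intro k _
    simp only [Function.comp_apply]
    push_cast
    ring_nf
  rw [ht, pv_zip_range_maps, List.map_map]
  apply List.map_congr_left
  intro k _
  simp only [Function.comp_apply, pvEntry]
  have : end_ + ((k : Int) + 1) * (start - end_) = start + (k : Int) * (start - end_) := by ring
  rw [this]

theorem create_date_ranges_py_eq_alt (start end_ num_periods : Int) :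
    create_date_ranges_py start end_ num_periods
      = create_date_ranges_py_alt start end_ num_periods := by
  by_cases h : num_periods ≤ 0
  · -- A produces []; B's zip is empty because labels[1:] is empty (labels has ≤ 1 element)
    simp only [create_date_ranges_py, create_date_ranges_py_alt]
    rw [PySem.List.pyRange_one_eq_nil h, PySem.List.slice_from_one]
    rcases lt_or_eq_of_le h with h' | h'
    · rw [PySem.List.pyRange_one_eq_nil (by omega)]
      simp
    · subst h'
      norm_num [PySem.List.pyRange_one]
  · rw [not_le] at h
    obtain ⟨n, hn⟩ : ∃ n : Nat, num_periods = (n : Int) := ⟨num_periods.toNat, by omega⟩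
    subst hn
    rw [pv_altB]
    simp only [create_date_ranges_py]
    rw [pv_foldA]
    simp

-- ===== VERDICT (by name: the statement is the Claim_ definition above) =====
theorem create_date_ranges_py_spec : Claim_equal_create_date_ranges_py := by
  intro start end_ num_periods _
  unfold Spec_create_date_ranges_py
  exact create_date_ranges_py_eq_alt start end_ num_periods
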